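-- pv_equiv track=rewrite | github.com/notlosca/auslan-classification | utils/dtw.py | compute_allowed_edges
-- ===== SOURCE A (Python) =====
-- from typing import Tuple, List
-- from itertools import combinations
-- from typing import List, Tuple
--
-- def compute_allowed_edges(nodes:List[Tuple], allowed_combinations:list=[(0,1), (1,0), (1,1)]) -> List[Tuple]:
--     """
--     Compute allowed edges from all possible combination of 2 nodes following the allowed set of combinations.
--
--     Args:
--         nodes (List[Tuple]): List of nodes from which we compute all possible combinations.
--         allowed_combinations (list, optional): Set of allowed transitions. Defaults to [(0,1), (1,0), (1,1)].
--
--     Returns: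
--         List[Tuple]: List of edges following the allowed_combinations list.
--     """
--     combs = list(combinations(nodes, 2))
--
--     allowed_edges = []
--     illegal_edges = []
--
--     for combination in combs:
--         c0 = combination[0]
--         c1 = combination[1]
--         res = (c1[0]-c0[0], c1[1]-c0[1])
--         if res in allowed_combinations:
--             allowed_edges.append(combination)
--         else:
--             illegal_edges.append(combination)
--     return allowed_edges
-- ===== SOURCE B (Python) =====
-- from typing import Tuple, List
--
-- def compute_allowed_edges(nodes:List[Tuple], allowed_combinations:list=[(0,1), (1,0), (1,1)]) -> List[Tuple]:
--     """O(n*k + n log n)-style re-implementation: hash node positions, then per node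
--     look up only the k allowed offsets instead of scanning all other nodes."""
--     if len(nodes) < 2:
--         return []
--     index = {}
--     for i, node in enumerate(nodes):
--         index.setdefault((node[0], node[1]), []).append((i, node))
--     offsets = []
--     for off in allowed_combinations:
--         if off not in offsets:
--             offsets.append(off)
--     edges = []
--     for i, node in enumerate(nodes):
--         x, y = node[0], node[1]
--         found = []
--         for dx, dy in offsets:
--             for j, other in index.get((x + dx, y + dy), []):
--                 if j > i:
--                     found.append((j, other))
--         found.sort(key=lambda t: t[0])
--         for _, other in found:
--             edges.append((node, other))
--     return edges
-- ===== Notes on version B (the rewrite author's own statement) =====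
-- stated objective: faster
-- what changed: Replaces the O(n^2) scan over all itertools.combinations pairs by a dict from (x,y) coordinates to enumerated nodes: each node looks up only the deduplicated allowed offsets and sorts its few matches by index.
import Mathlib
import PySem

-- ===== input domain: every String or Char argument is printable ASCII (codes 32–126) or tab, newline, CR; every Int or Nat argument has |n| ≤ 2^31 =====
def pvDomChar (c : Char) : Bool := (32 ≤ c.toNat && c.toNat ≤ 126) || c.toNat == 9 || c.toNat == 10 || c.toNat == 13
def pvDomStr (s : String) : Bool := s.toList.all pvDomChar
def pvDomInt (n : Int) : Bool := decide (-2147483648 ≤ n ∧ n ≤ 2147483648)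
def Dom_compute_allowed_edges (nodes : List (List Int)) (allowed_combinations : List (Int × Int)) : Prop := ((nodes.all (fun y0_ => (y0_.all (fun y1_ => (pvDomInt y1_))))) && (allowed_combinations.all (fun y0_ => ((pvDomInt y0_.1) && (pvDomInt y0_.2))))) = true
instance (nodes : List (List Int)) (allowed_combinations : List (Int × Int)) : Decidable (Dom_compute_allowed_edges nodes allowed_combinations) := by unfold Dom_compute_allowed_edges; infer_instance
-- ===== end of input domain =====

-- B replaces A's scan of all O(n^2) node pairs by a hash map from coordinates to node
-- indices, looking up only the allowed offsets per node (objective: faster).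

-- ===== PORT A =====
-- itertools.combinations(nodes, 2), in Python's order
def pvCombs2 : List (List Int) → List (List Int × List Int)
  | [] => []
  | x :: xs => xs.map (fun y => (x, y)) ++ pvCombs2 xs

-- (c1[0]-c0[0], c1[1]-c0[1]); none exactly where Python raises IndexError
def pvDiffA (c0 c1 : List Int) : Option (Int × Int) :=
  match PySem.List.pyGet? c1 0, PySem.List.pyGet? c0 0, PySem.List.pyGet? c1 1, PySem.List.pyGet? c0 1 with
  | some a, some b, some cc, some d => some (a - b, cc - d)
  | _, _, _, _ => none

def compute_allowed_edges (nodes : List (List Int)) (allowed_combinations : List (Int × Int)) : List (List (List Int)) :=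
  -- the loop keeps (allowed_edges, illegal_edges); only allowed_edges is returned
  ((pvCombs2 nodes).foldl
    (fun (st : List (List (List Int)) × List (List (List Int))) comb =>
      match pvDiffA comb.1 comb.2 with
      | some res =>
          if res ∈ allowed_combinations then (st.1 ++ [[comb.1, comb.2]], st.2)
          else (st.1, st.2 ++ [[comb.1, comb.2]])
      | none => st)  -- unreachable under Pre_ (IndexError in Python)
    ([], [])).1

-- ===== PORT B =====
-- (node[0], node[1]); none exactly where Python raises IndexError
def pvXY (node : List Int) : Option (Int × Int) :=
  match PySem.List.pyGet? node 0, PySem.List.pyGet? node 1 with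
  | some x, some y => some (x, y)
  | _, _ => none

-- index.setdefault((node[0], node[1]), []).append((i, node))
def pvIndex (nodes : List (List Int)) : PySem.Dict (Int × Int) (List (Int × List Int)) :=
  (PySem.List.enumerate nodes 0).foldl
    (fun d p =>
      match pvXY p.2 with
      | some k => d.modify k [] (fun l => l ++ [p])
      | none => d)
    PySem.Dict.empty

-- deduplicate allowed_combinations, first occurrences in order
def pvOffsets (allowed_combinations : List (Int × Int)) : List (Int × Int) :=
  allowed_combinations.foldl (fun acc off => if off ∈ acc then acc else acc ++ [off]) []

def compute_allowed_edges_alt (nodes : List (List Int)) (allowed_combinations : List (Int × Int)) : List (List (List Int)) :=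
  if nodes.length < 2 then [] else
  let index := pvIndex nodes
  let offsets := pvOffsets allowed_combinations
  (PySem.List.enumerate nodes 0).foldl
    (fun edges p =>
      match pvXY p.2 with
      | some xy =>
          let found := offsets.foldl
            (fun f off =>
              (index.getD (xy.1 + off.1, xy.2 + off.2) []).foldl
                (fun g q => if p.1 < q.1 then g ++ [q] else g) f)
            []
          (PySem.List.sorted found (fun t => t.1) false).foldl
            (fun e q => e ++ [[p.2, q.2]]) edges
      | none => edges)  -- unreachable under Pre_
    []

-- ===== PRECONDITION & SPEC =====
-- Pre_ excludes exactly the inputs where Python A raises IndexError: with at least two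
-- nodes, some node of length < 2 is reached by combinations and indexed out of range.
def Pre_compute_allowed_edges (nodes : List (List Int)) (allowed_combinations : List (Int × Int)) : Prop :=
  nodes.length ≤ 1 ∨ ∀ nd ∈ nodes, 2 ≤ nd.length
instance (nodes : List (List Int)) (allowed_combinations : List (Int × Int)) : Decidable (Pre_compute_allowed_edges nodes allowed_combinations) := by unfold Pre_compute_allowed_edges; infer_instance

def pvWitness_compute_allowed_edges : List (List Int) × (List (Int × Int)) :=
  ([[0, 0], [0, 1], [1, 1]], [(0, 1), (1, 0), (1, 1)])

def Spec_compute_allowed_edges (nodes : List (List Int)) (allowed_combinations : List (Int × Int)) (out : List (List (List Int))) : Prop := out = compute_allowed_edges_alt nodes allowed_combinations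
instance (nodes : List (List Int)) (allowed_combinations : List (Int × Int)) (out : List (List (List Int))) : Decidable (Spec_compute_allowed_edges nodes allowed_combinations out) := by unfold Spec_compute_allowed_edges; infer_instance

-- ===== CLAIM (what is proved, stated in full; the proofs are below) =====
def Claim_equal_compute_allowed_edges : Prop := ∀ (nodes : List (List Int)) (allowed_combinations : List (Int × Int)), Dom_compute_allowed_edges nodes allowed_combinations → Pre_compute_allowed_edges nodes allowed_combinations → Spec_compute_allowed_edges nodes allowed_combinations (compute_allowed_edges nodes allowed_combinations)

-- ===== LEMMAS AND PROOFS =====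

-- total coordinate pair, used only by the proofs
def pvC (nd : List Int) : Int × Int := (pvXY nd).getD (0, 0)

-- A's membership test on a pair of enumerated nodes, used only by the proofs
def pvTestA (allowed : List (Int × Int)) (p q : Int × List Int) : Bool :=
  decide (p.1 < q.1) &&
    (match pvDiffA p.2 q.2 with
     | some res => decide (res ∈ allowed)
     | none => false)

theorem pvXY_of_len {nd : List Int} (h : 2 ≤ nd.length) : pvXY nd = some (pvC nd) := by
  match nd, h with
  | a :: b :: t, _ =>
    simp [pvXY, pvC, PySem.List.pyGet?, PySem.List.pyIdx?,
      show (0:Int) ≤ (t.length:Int)+1 from by positivity]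

theorem pvDiffA_of_len {c0 c1 : List Int} (h0 : 2 ≤ c0.length) (h1 : 2 ≤ c1.length) :
    pvDiffA c0 c1 = some ((pvC c1).1 - (pvC c0).1, (pvC c1).2 - (pvC c0).2) := by
  match c0, h0, c1, h1 with
  | a :: b :: t, _, a' :: b' :: t', _ =>
    simp [pvDiffA, pvC, pvXY, PySem.List.pyGet?, PySem.List.pyIdx?,
      show (0:Int) ≤ (t.length:Int)+1 from by positivity,
      show (0:Int) ≤ (t'.length:Int)+1 from by positivity]

theorem le_fst_of_mem_enumerate {xs : List (List Int)} {s : Int} {q : Int × List Int}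
    (h : q ∈ PySem.List.enumerate xs s) : s ≤ q.1 := by
  rw [PySem.List.mem_enumerate_iff] at h
  obtain ⟨k, hk, rfl⟩ := h; simp

theorem snd_mem_of_mem_enumerate {xs : List (List Int)} {s : Int} {q : Int × List Int}
    (h : q ∈ PySem.List.enumerate xs s) : q.2 ∈ xs := by
  rw [PySem.List.mem_enumerate_iff] at h
  obtain ⟨k, hk, rfl⟩ := h; simp

-- A's loop, as filter + map
theorem pvA_foldl (allowed : List (Int × Int)) (l : List (List Int × List Int))
    (st : List (List (List Int)) × List (List (List Int))) :
    (l.foldl (fun st comb =>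
      match pvDiffA comb.1 comb.2 with
      | some res =>
          if res ∈ allowed then (st.1 ++ [[comb.1, comb.2]], st.2)
          else (st.1, st.2 ++ [[comb.1, comb.2]])
      | none => st) st).1
    = st.1 ++ (l.filter (fun cb =>
        match pvDiffA cb.1 cb.2 with
        | some res => decide (res ∈ allowed)
        | none => false)).map (fun cb => [cb.1, cb.2]) := by
  induction l generalizing st with
  | nil => simp
  | cons cb l ih =>
    simp only [List.foldl_cons, List.filter_cons]
    cases h : pvDiffA cb.1 cb.2 with
    | none => simp [ih]
    | some res =>
      by_cases hm : res ∈ allowed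
      · simp [hm, ih]
      · simp [hm, ih]

-- combinations(nodes, 2) through enumerate
theorem pvCombs2_eq (l : List (List Int)) : ∀ (s : Int),
    pvCombs2 l = (PySem.List.enumerate l s).flatMap (fun p =>
      ((PySem.List.enumerate l s).filter (fun q => decide (p.1 < q.1))).map
        (fun q => (p.2, q.2))) := by
  induction l with
  | nil => intro s; simp [pvCombs2]
  | cons x xs ih =>
    intro s
    rw [PySem.List.enumerate_cons, List.flatMap_cons]
    have hhd : (((s, x) :: PySem.List.enumerate xs (s+1)).filter
        (fun q => decide ((s, x).1 < q.1))).map (fun q => ((s, x).2, q.2))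
        = xs.map (fun y => (x, y)) := by
      rw [List.filter_cons]
      have h2 : (PySem.List.enumerate xs (s+1)).filter (fun q => decide ((s, x).1 < q.1))
          = PySem.List.enumerate xs (s+1) := by
        rw [List.filter_eq_self]
        intro q hq
        have := le_fst_of_mem_enumerate hq
        simp only [decide_eq_true_eq]
        omega
      simp only [decide_eq_true_eq, lt_self_iff_false, if_false, h2]
      have h3 := PySem.List.map_snd_enumerate xs (s+1)
      calc (PySem.List.enumerate xs (s+1)).map (fun q => ((s, x).2, q.2))
          = ((PySem.List.enumerate xs (s+1)).map (fun q => q.2)).map (fun y => (x, y)) := by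
            rw [List.map_map]; rfl
        _ = xs.map (fun y => (x, y)) := by rw [h3]
    have htl : (PySem.List.enumerate xs (s+1)).flatMap (fun p =>
        (((s, x) :: PySem.List.enumerate xs (s+1)).filter
          (fun q => decide (p.1 < q.1))).map (fun q => (p.2, q.2)))
        = pvCombs2 xs := by
      rw [ih (s+1)]
      apply List.flatMap_congr
      intro p hp
      have hps := le_fst_of_mem_enumerate hp
      rw [List.filter_cons]
      have : (decide (p.1 < (s, x).1)) = false := by
        simp only [decide_eq_false_iff_not]; simp at hps ⊢; omega
      rw [this]
      simp
    simp only [pvCombs2]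
    rw [hhd, htl]

-- the hash index: getD reads off exactly the enumerated nodes with the given coordinates
theorem pvIndex_getD_aux (L : List (Int × List Int)) :
    ∀ (d : PySem.Dict (Int × Int) (List (Int × List Int))) (k : Int × Int),
    (L.foldl (fun d p =>
        match pvXY p.2 with
        | some kk => d.modify kk [] (fun l => l ++ [p])
        | none => d) d).getD k []
    = d.getD k [] ++ L.filter (fun p => pvXY p.2 == some k) := by
  induction L with
  | nil => intro d k; simp
  | cons p L ih =>
    intro d k
    simp only [List.foldl_cons, List.filter_cons]
    cases h : pvXY p.2 with
    | none => rw [ih]; simp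
    | some kk =>
      rw [ih]
      rw [PySem.Dict.getD_modify]
      by_cases hk : k = kk
      · subst hk
        simp
      · have : ((some kk : Option (Int × Int)) == some k) = false := by
          simp; exact fun hh => hk hh.symm
        simp [hk, this]

theorem pvIndex_getD (nodes : List (List Int)) (k : Int × Int) :
    (pvIndex nodes).getD k []
    = (PySem.List.enumerate nodes 0).filter (fun p => pvXY p.2 == some k) := by
  unfold pvIndex
  rw [pvIndex_getD_aux]
  simp

-- dedup loop: same members, no duplicates
theorem pvOffsets_mem_aux (al : List (Int × Int)) :
    ∀ (acc : List (Int × Int)) (x : Int × Int),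
    (x ∈ al.foldl (fun acc off => if off ∈ acc then acc else acc ++ [off]) acc)
      ↔ x ∈ acc ∨ x ∈ al := by
  induction al with
  | nil => intro acc x; simp
  | cons o al ih =>
    intro acc x
    simp only [List.foldl_cons]
    by_cases h : o ∈ acc
    · rw [if_pos h, ih]
      constructor
      · rintro (h1 | h1)
        · exact Or.inl h1
        · exact Or.inr (List.mem_cons_of_mem _ h1)
      · rintro (h1 | h1)
        · exact Or.inl h1
        · rcases List.mem_cons.mp h1 with rfl | h1
          · exact Or.inl h
          · exact Or.inr h1
    · rw [if_neg h, ih]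
      simp only [List.mem_append, List.mem_cons]
      tauto

theorem pvOffsets_mem (al : List (Int × Int)) (x : Int × Int) :
    x ∈ pvOffsets al ↔ x ∈ al := by
  unfold pvOffsets
  rw [pvOffsets_mem_aux]
  simp

theorem pvOffsets_nodup_aux (al : List (Int × Int)) :
    ∀ (acc : List (Int × Int)), acc.Nodup →
    (al.foldl (fun acc off => if off ∈ acc then acc else acc ++ [off]) acc).Nodup := by
  induction al with
  | nil => intro acc h; simpa
  | cons o al ih =>
    intro acc h
    simp only [List.foldl_cons]
    by_cases hm : o ∈ acc
    · rw [if_pos hm]; exact ih _ h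
    · rw [if_neg hm]
      refine ih _ ?_
      rw [List.nodup_append]
      refine ⟨h, List.nodup_singleton _, ?_⟩
      intro a ha b hb
      rw [List.mem_singleton] at hb
      subst hb
      exact fun e => hm (e ▸ ha)

theorem pvOffsets_nodup (al : List (Int × Int)) : (pvOffsets al).Nodup :=
  pvOffsets_nodup_aux al [] (List.nodup_nil)

-- a filter by a disjunction of disjoint tests splits, up to permutation
theorem filter_or_perm {α : Type} (a b : α → Bool) (hdisj : ∀ x, a x = true → b x = false) :
    ∀ L : List α, (L.filter (fun x => a x || b x)).Perm (L.filter a ++ L.filter b) := by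
  intro L
  induction L with
  | nil => simp
  | cons x L ih =>
    simp only [List.filter_cons]
    cases ha : a x with
    | true =>
      have hb := hdisj x ha
      simp only [hb, Bool.true_or, if_true]
      simpa using ih.cons x
    | false =>
      cases hb : b x with
      | true =>
        simp only [Bool.false_or, if_true]
        exact (ih.cons x).trans (List.perm_middle.symm)
      | false =>
        simpa [ha, hb] using ih

-- union of per-offset filters over distinct offsets = filter by membership, up to permutation
theorem flatMap_filter_perm {α β : Type} [DecidableEq β] (F : α → β) (pr : α → Bool) :
    ∀ (os : List β), os.Nodup → ∀ L : List α,
    (os.flatMap (fun o => L.filter (fun x => decide (F x = o) && pr x))).Perm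
      (L.filter (fun x => decide (F x ∈ os) && pr x)) := by
  intro os
  induction os with
  | nil => intro _ L; simp
  | cons o os ih =>
    intro hnd L
    rw [List.flatMap_cons]
    have hnot : o ∉ os := (List.nodup_cons.mp hnd).1
    have h1 := ih (List.nodup_cons.mp hnd).2 L
    have h2 := filter_or_perm (fun x => decide (F x = o) && pr x)
        (fun x => decide (F x ∈ os) && pr x)
        (by
          intro x hx
          simp only [Bool.and_eq_true, decide_eq_true_eq] at hx
          have : F x ∉ os := hx.1 ▸ hnot
          simp [this]) L
    have h3 : L.filter (fun x => decide (F x ∈ o :: os) && pr x)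
        = L.filter (fun x => (decide (F x = o) && pr x) || (decide (F x ∈ os) && pr x)) := by
      apply List.filter_congr
      intro x _
      by_cases h : F x = o <;> by_cases h' : F x ∈ os <;> cases hpr : pr x <;>
        simp [h, h']
    rw [h3]
    exact (h1.append_left _).trans h2.symm

-- the per-node "found" list, sorted by index, is exactly A's filtered tail
theorem found_eq (nodes : List (List Int)) (allowed : List (Int × Int))
    (h2 : ∀ nd ∈ nodes, 2 ≤ nd.length) (p : Int × List Int)
    (hp : p ∈ PySem.List.enumerate nodes 0) :
    PySem.List.sorted
      ((pvOffsets allowed).foldl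
        (fun f off =>
          ((pvIndex nodes).getD ((pvC p.2).1 + off.1, (pvC p.2).2 + off.2) []).foldl
            (fun g q => if p.1 < q.1 then g ++ [q] else g) f)
        [])
      (fun t => t.1) false
    = (PySem.List.enumerate nodes 0).filter (pvTestA allowed p) := by
  have hxyall : ∀ q : Int × List Int, q ∈ PySem.List.enumerate nodes 0 →
      pvXY q.2 = some (pvC q.2) :=
    fun q hq => pvXY_of_len (h2 q.2 (snd_mem_of_mem_enumerate hq))
  -- the difference of coordinates, as a total function
  set F : Int × List Int → Int × Int :=
    fun q => ((pvC q.2).1 - (pvC p.2).1, (pvC q.2).2 - (pvC p.2).2) with hF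
  -- step 1: found = flatMap of per-offset filters
  have hstep : ((pvOffsets allowed).foldl
      (fun f off =>
        ((pvIndex nodes).getD ((pvC p.2).1 + off.1, (pvC p.2).2 + off.2) []).foldl
          (fun g q => if p.1 < q.1 then g ++ [q] else g) f)
      [])
      = (pvOffsets allowed).flatMap (fun off =>
          (PySem.List.enumerate nodes 0).filter
            (fun q => decide (F q = off) && decide (p.1 < q.1))) := by
    have hone : ∀ (f : List (Int × List Int)) (off : Int × Int),
        ((pvIndex nodes).getD ((pvC p.2).1 + off.1, (pvC p.2).2 + off.2) []).foldl
          (fun g q => if p.1 < q.1 then g ++ [q] else g) f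
        = f ++ (PySem.List.enumerate nodes 0).filter
            (fun q => decide (F q = off) && decide (p.1 < q.1)) := by
      intro f off
      rw [PySem.List.foldl_append_ite_eq_filter]
      rw [pvIndex_getD]
      rw [List.filter_filter]
      congr 1
      apply List.filter_congr
      intro q hq
      rw [hxyall q hq]
      by_cases hlt : p.1 < q.1 <;>
        by_cases hco : pvC q.2 = ((pvC p.2).1 + off.1, (pvC p.2).2 + off.2)
      · have : F q = off := by
          show ((pvC q.2).1 - (pvC p.2).1, (pvC q.2).2 - (pvC p.2).2) = off
          rw [hco]; simp
        simp [hlt, this, hco]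
      · have hL : (pvC q.2 == ((pvC p.2).1 + off.1, (pvC p.2).2 + off.2)) = false :=
          beq_eq_false_iff_ne.mpr hco
        simp [hlt, hL]
        intro hc
        apply hco
        have h1 : (pvC q.2).1 - (pvC p.2).1 = off.1 := congrArg Prod.fst hc
        have h2' : (pvC q.2).2 - (pvC p.2).2 = off.2 := congrArg Prod.snd hc
        have hpc : pvC q.2 = ((pvC q.2).1, (pvC q.2).2) := rfl
        rw [hpc]
        congr 1 <;> omega
      · simp [hlt]
      · simp [hlt]
    rw [PySem.List.foldl_congr_mem' _ _
        (fun f off => f ++ (PySem.List.enumerate nodes 0).filter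
          (fun q => decide (F q = off) && decide (p.1 < q.1))) _
        (fun off _ f => hone f off)]
    rw [PySem.List.foldl_append_eq_flatMap]
    simp
  rw [hstep]
  -- step 2: the target is a permutation of found and strictly index-sorted
  have hperm := flatMap_filter_perm F (fun q => decide (p.1 < q.1))
      (pvOffsets allowed) (pvOffsets_nodup allowed) (PySem.List.enumerate nodes 0)
  have hpw : ((PySem.List.enumerate nodes 0).filter (pvTestA allowed p)).Pairwise
      (fun a b : Int × List Int => a.1 < b.1) :=
    List.Pairwise.sublist List.filter_sublist (PySem.List.pairwise_lt_enumerate nodes 0)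
  exact PySem.List.sorted_eq_of_perm_of_pairwise_lt _ _ _
    (hperm.trans (List.Perm.of_eq (List.filter_congr (by
      intro q hq
      have hd := pvDiffA_of_len (h2 p.2 (snd_mem_of_mem_enumerate hp))
          (h2 q.2 (snd_mem_of_mem_enumerate hq))
      unfold pvTestA
      rw [hd]
      have hiff : (F q ∈ pvOffsets allowed) ↔ (F q ∈ allowed) := pvOffsets_mem allowed (F q)
      rw [decide_eq_decide.mpr hiff]
      rw [Bool.and_comm])))).symm hpw

-- A, characterised through enumerate
theorem A_char (nodes : List (List Int)) (allowed : List (Int × Int)) :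
    compute_allowed_edges nodes allowed
    = (PySem.List.enumerate nodes 0).flatMap (fun p =>
        ((PySem.List.enumerate nodes 0).filter (pvTestA allowed p)).map
          (fun q => ([p.2, q.2] : List (List Int)))) := by
  unfold compute_allowed_edges
  rw [pvA_foldl]
  rw [List.nil_append]
  rw [pvCombs2_eq nodes 0]
  rw [List.filter_flatMap]
  rw [List.map_flatMap]
  apply List.flatMap_congr
  intro p _
  rw [List.filter_map]
  rw [List.filter_filter]
  rw [List.map_map]
  have hfc : List.filter (fun a => ((fun cb =>
        match pvDiffA cb.1 cb.2 with
        | some res => decide (res ∈ allowed)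
        | none => false) ∘ fun q => (p.2, q.2)) a && decide (p.1 < a.1))
      (PySem.List.enumerate nodes 0)
      = List.filter (pvTestA allowed p) (PySem.List.enumerate nodes 0) := by
    apply List.filter_congr
    intro q _
    unfold pvTestA
    simp only [Function.comp]
    exact Bool.and_comm _ _
  rw [hfc]
  apply List.map_congr_left
  intro q _
  simp

-- B, characterised the same way
theorem B_char (nodes : List (List Int)) (allowed : List (Int × Int))
    (hlen : ¬ nodes.length < 2) (h2 : ∀ nd ∈ nodes, 2 ≤ nd.length) :
    compute_allowed_edges_alt nodes allowed
    = (PySem.List.enumerate nodes 0).flatMap (fun p =>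
        ((PySem.List.enumerate nodes 0).filter (pvTestA allowed p)).map
          (fun q => ([p.2, q.2] : List (List Int)))) := by
  simp only [compute_allowed_edges_alt, if_neg hlen]
  rw [PySem.List.foldl_congr_mem' _ _
      (fun edges p => edges ++ ((PySem.List.enumerate nodes 0).filter (pvTestA allowed p)).map
        (fun q => ([p.2, q.2] : List (List Int)))) _
      (by
        intro p hp edges
        rw [pvXY_of_len (h2 p.2 (snd_mem_of_mem_enumerate hp))]
        simp only
        rw [found_eq nodes allowed h2 p hp]
        rw [PySem.List.foldl_append_singleton_eq_map])]
  rw [PySem.List.foldl_append_eq_flatMap]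
  simp

-- ===== VERDICT (by name: the statement is the Claim_ definition above) =====
theorem compute_allowed_edges_spec : Claim_equal_compute_allowed_edges := by
  intro nodes allowed _ hpre
  unfold Spec_compute_allowed_edges
  by_cases hlen : nodes.length < 2
  · have hB : compute_allowed_edges_alt nodes allowed = [] := by
      unfold compute_allowed_edges_alt
      rw [if_pos hlen]
    rw [hB]
    match nodes, hlen with
    | [], _ => simp [compute_allowed_edges, pvCombs2]
    | [nd], _ => simp [compute_allowed_edges, pvCombs2]
  · have h2 : ∀ nd ∈ nodes, 2 ≤ nd.length := by
      rcases hpre with h | h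
      · omega
      · exact h
    rw [A_char nodes allowed, B_char nodes allowed hlen h2]
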